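-- pv_equiv track=rewrite | github.com/kunalpro379/M-Indicator-Hackathon-Project | Agents/ProgressTrackingAgent/escalation_analyzer.py | _determine_escalation_level
-- ===== SOURCE A (Python) =====
-- from typing import Dict, Any, List
--
-- def _determine_escalation_level(triggers: List[Dict[str, Any]]) -> str:
--     """Determine escalation level based on trigger severity"""
--     if not triggers:
--         return "none"
--
--     severities = [t.get("severity") for t in triggers]
--
--     if "critical" in severities:
--         return "immediate"  # Escalate to highest authority immediately
--     elif severities.count("high") >= 2:
--         return "urgent"  # Escalate to senior management
--     elif "high" in severities:
--         return "priority"  # Escalate to department head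
--     else:
--         return "standard"  # Standard escalation process
-- ===== SOURCE B (Python) =====
-- def _determine_escalation_level(triggers):
--     """Determine escalation level based on trigger severity"""
--     if not triggers:
--         return "none"
--     level = "standard"
--     for t in triggers:
--         level = _raise_level(level, t.get("severity"))
--     return level
--
-- def _raise_level(level, severity):
--     """Join one severity into the current level in the escalation lattice."""
--     if severity == "critical":
--         return "immediate"
--     if severity == "high":
--         if level == "standard":
--             return "priority"
--         if level == "priority":
--             return "urgent"
--     return level
-- ===== Notes on version B (the rewrite author's own statement) =====
-- stated objective: alternative
-- what changed: Replaces A's prebuilt severities list and three staged scans (membership, count, membership) with a fold over triggers in the escalation-level lattice: each severity directly raises the current level (critical jumps to immediate, high bumps standard->priority->urgent), with no flags, counters or membership tests.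
import Mathlib
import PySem

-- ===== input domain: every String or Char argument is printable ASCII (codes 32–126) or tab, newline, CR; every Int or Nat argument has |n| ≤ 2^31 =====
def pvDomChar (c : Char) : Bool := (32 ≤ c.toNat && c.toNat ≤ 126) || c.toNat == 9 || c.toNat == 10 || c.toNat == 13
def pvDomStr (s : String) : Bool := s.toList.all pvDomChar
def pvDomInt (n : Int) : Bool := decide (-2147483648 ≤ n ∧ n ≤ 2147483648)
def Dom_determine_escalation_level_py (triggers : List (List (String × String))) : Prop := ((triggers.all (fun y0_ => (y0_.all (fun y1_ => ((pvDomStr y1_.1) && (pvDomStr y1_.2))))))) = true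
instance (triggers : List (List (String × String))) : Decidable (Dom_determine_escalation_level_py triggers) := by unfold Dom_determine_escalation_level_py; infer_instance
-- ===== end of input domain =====

-- B replaces A's severities list and three staged scans with a fold in the escalation-level lattice: each severity directly raises the current level (alternative decomposition, same cost).

-- ===== PORT A =====
-- A: build the severities list, then three separate scans (membership, count, membership)
def determine_escalation_level_py (triggers : List (List (String × String))) : String :=
  if triggers = [] then "none"
  else
    let severities := triggers.map (fun t => (PySem.Dict.mk t).get? "severity")
    if (some "critical") ∈ severities then "immediate"
    else if PySem.List.count severities (some "high") ≥ 2 then "urgent"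
    else if (some "high") ∈ severities then "priority"
    else "standard"

-- ===== PORT B =====
-- B helper: join one severity into the current level
def raise_level (level : String) (severity : Option String) : String :=
  if severity = some "critical" then "immediate"
  else if severity = some "high" then
    if level = "standard" then "priority"
    else if level = "priority" then "urgent"
    else level
  else level

-- B: fold over triggers, raising the current level per severity
def determine_escalation_level_py_alt (triggers : List (List (String × String))) : String :=
  if triggers = [] then "none"
  else
    triggers.foldl (fun level t => raise_level level ((PySem.Dict.mk t).get? "severity")) "standard"

-- ===== PRECONDITION & SPEC =====
def Spec_determine_escalation_level_py (triggers : List (List (String × String))) (out : String) : Prop := out = determine_escalation_level_py_alt triggers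
instance (triggers : List (List (String × String))) (out : String) : Decidable (Spec_determine_escalation_level_py triggers out) := by unfold Spec_determine_escalation_level_py; infer_instance

-- ===== CLAIM (what is proved, stated in full; the proofs are below) =====
def Claim_equal_determine_escalation_level_py : Prop := ∀ (triggers : List (List (String × String))), Dom_determine_escalation_level_py triggers → Spec_determine_escalation_level_py triggers (determine_escalation_level_py triggers)

-- ===== LEMMAS AND PROOFS =====

-- encode (seen critical?, number of highs seen) as a level string
def esc_enc (c : Bool) (h : Nat) : String :=
  if c then "immediate" else if 2 ≤ h then "urgent" else if 1 ≤ h then "priority" else "standard"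

theorem raise_level_enc (c : Bool) (h : Nat) (s : Option String) :
    raise_level (esc_enc c h) s =
      esc_enc (c || decide (s = some "critical")) (h + (if s = some "high" then 1 else 0)) := by
  by_cases hc : s = some "critical"
  · simp [raise_level, hc, esc_enc]
  · by_cases hh : s = some "high"
    · subst hh
      cases c with
      | true => simp [raise_level, esc_enc, hc]
      | false =>
        simp only [raise_level, esc_enc, hc]
        rcases Nat.lt_or_ge h 1 with h1 | h1
        · interval_cases h <;> simp
        · rcases Nat.lt_or_ge h 2 with h2 | h2
          · interval_cases h <;> simp
          · have : ¬ (h = 0) := by omega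
            simp [h1, h2, this, show 2 ≤ h + 1 by omega, show ¬ ("urgent" : String) = "standard" from by decide,
                  show ¬ ("urgent" : String) = "priority" from by decide]
    · simp [raise_level, hc, hh]

theorem foldl_raise_enc (l : List (Option String)) (c : Bool) (h : Nat) :
    l.foldl raise_level (esc_enc c h)
      = esc_enc (c || decide (some "critical" ∈ l)) (h + l.count (some "high")) := by
  induction l generalizing c h with
  | nil => simp
  | cons s rest ih =>
    simp only [List.foldl_cons, List.mem_cons, List.count_cons]
    rw [raise_level_enc, ih]
    congr 1
    · by_cases hc : s = some "critical" <;> simp [hc, eq_comm]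
    · by_cases hh : s = some "high" <;> simp [hh] <;> omega

theorem determine_escalation_level_py_spec : Claim_equal_determine_escalation_level_py := by
  intro triggers _
  unfold Spec_determine_escalation_level_py determine_escalation_level_py determine_escalation_level_py_alt
  by_cases he : triggers = []
  · simp [he]
  · simp only [he, if_false]
    have hfold : triggers.foldl (fun level t => raise_level level ((PySem.Dict.mk t).get? "severity")) "standard"
        = (triggers.map (fun t => (PySem.Dict.mk t).get? "severity")).foldl raise_level "standard" := by
      rw [List.foldl_map]
    rw [hfold]
    have : ("standard" : String) = esc_enc false 0 := by decide
    rw [this, foldl_raise_enc]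
    set sevs := triggers.map (fun t => (PySem.Dict.mk t).get? "severity") with hs
    simp only [Bool.false_or, Nat.zero_add, PySem.List.count_eq, esc_enc]
    by_cases hc : (some "critical") ∈ sevs
    · simp [hc]
    · simp only [hc, decide_false, Bool.false_eq_true, if_false]
      by_cases h2 : sevs.count (some "high") ≥ 2
      · have h2' : ((sevs.count (some "high") : Int) ≥ 2) := by exact_mod_cast h2
        simp [h2, h2']
      · have h2' : ¬ ((sevs.count (some "high") : Int) ≥ 2) := by exact_mod_cast h2
        simp only [h2, h2', if_false]
        by_cases hh : (some "high") ∈ sevs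
        · have h1 : 1 ≤ sevs.count (some "high") := List.one_le_count_iff.mpr hh
          simp [hh, h1, h2]
        · have h0 : sevs.count (some "high") = 0 := List.count_eq_zero.mpr hh
          simp [hh, h0]
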